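-- pv_equiv track=rewrite | github.com/alexandraback/datacollection | solutions_2692487_1/Python/MartinThoma/A.py | stepsNeededForNext
-- ===== SOURCE A (Python) =====
-- def stepsNeededForNext(A, motes):
--     m = min(motes)
--     steps = 0
--     if m >= 1 and A == 1:
--         return 10**12
--     while A <= m:
--         A += (A-1)
--         steps += 1
--     return steps
-- ===== SOURCE B (Python) =====
-- def stepsNeededForNext(A, motes):
--     m = min(motes)
--     if m < A:
--         return 0
--     if A == 1:
--         return 10**12
--     r = -(-m // (A - 1))        # ceil(m / (A-1))
--     return (r - 1).bit_length() # smallest k with (A-1)*2**k >= m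
-- ===== Notes on version B (the rewrite author's own statement) =====
-- stated objective: alternative
-- what changed: Replaces A's doubling while-loop by a closed form: since the loop doubles A-1 each step, B ceil-divides min(motes) by A-1 and returns the bit length of that quotient minus one, with the same A==1 and min<A guards (loop is O(log) anyway, so min() dominates and a timing run shows parity).
-- outside the precondition, e.g. on stepsNeededForNext(0, [5]): A does not finish within the time limit, B returns 3; on stepsNeededForNext(1, []): A raises ValueError, B raises ValueError
import Mathlib
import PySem

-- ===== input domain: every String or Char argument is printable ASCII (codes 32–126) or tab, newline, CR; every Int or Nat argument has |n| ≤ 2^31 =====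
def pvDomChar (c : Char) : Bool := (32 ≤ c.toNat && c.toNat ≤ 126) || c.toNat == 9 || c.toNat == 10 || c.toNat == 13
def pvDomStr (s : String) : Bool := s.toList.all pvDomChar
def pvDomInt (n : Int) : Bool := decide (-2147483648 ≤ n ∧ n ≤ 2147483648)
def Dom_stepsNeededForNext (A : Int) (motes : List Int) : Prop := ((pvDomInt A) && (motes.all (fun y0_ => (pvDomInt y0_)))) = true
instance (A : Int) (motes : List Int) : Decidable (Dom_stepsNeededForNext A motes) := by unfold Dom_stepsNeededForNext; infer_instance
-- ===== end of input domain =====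

-- B replaces A's doubling while-loop by a closed form: ceil-divide min(motes) by A-1 and take a bit length (alternative algorithm; return values only, no mutation).

-- ===== PORT A =====
-- the while loop: 'while A <= m: A += (A-1); steps += 1'.  Python diverges when A ≤ 1 ∧ A ≤ m
-- (excluded by Pre_); there the port returns 0 to stay total.
def pvLoopA (m A steps : Int) : Int :=
  if _h : A ≤ m then
    if _h2 : 2 ≤ A then pvLoopA m (A + (A - 1)) (steps + 1)
    else 0
  else steps
termination_by (m + 1 - A).toNat
decreasing_by omega

def stepsNeededForNext (A : Int) (motes : List Int) : Int :=
  match PySem.List.min? motes (fun x => x) with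
  | none => 0   -- min([]) raises ValueError; excluded by Pre_
  | some m => if 1 ≤ m ∧ A = 1 then 10 ^ 12 else pvLoopA m A 0

-- ===== PORT B =====
def stepsNeededForNext_alt (A : Int) (motes : List Int) : Int :=
  match PySem.List.min? motes (fun x => x) with
  | none => 0   -- min([]) raises ValueError; excluded by Pre_
  | some m =>
    if m < A then 0
    else if A = 1 then 10 ^ 12
    else ((PySem.Int.bitLength ((-(PySem.Int.floordiv (-m) (A - 1))) - 1) : Nat) : Int)

-- ===== PRECONDITION & SPEC =====
-- Pre_ excludes the empty list (min raises ValueError) and the inputs A ≤ 0 with min(motes) ≥ A,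
-- on which A's while-loop never terminates.
def Pre_stepsNeededForNext (A : Int) (motes : List Int) : Prop :=
  motes ≠ [] ∧ (1 ≤ A ∨ ∃ x ∈ motes, x < A)
instance (A : Int) (motes : List Int) : Decidable (Pre_stepsNeededForNext A motes) := by unfold Pre_stepsNeededForNext; infer_instance

def pvWitness_stepsNeededForNext : Int × List Int := (2, [5, 9])

def Spec_stepsNeededForNext (A : Int) (motes : List Int) (out : Int) : Prop := out = stepsNeededForNext_alt A motes
instance (A : Int) (motes : List Int) (out : Int) : Decidable (Spec_stepsNeededForNext A motes out) := by unfold Spec_stepsNeededForNext; infer_instance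

-- ===== CLAIM (what is proved, stated in full; the proofs are below) =====
def Claim_equal_stepsNeededForNext : Prop := ∀ (A : Int) (motes : List Int), Dom_stepsNeededForNext A motes → Pre_stepsNeededForNext A motes → Spec_stepsNeededForNext A motes (stepsNeededForNext A motes)

-- ===== LEMMAS AND PROOFS =====

-- ceil(m/d) - 1 = (m-1) // d for 0 < d, 0 < m
lemma pvCeil_sub_one (m d : Int) (hd : 0 < d) (_hm : 0 < m) :
    -(PySem.Int.floordiv (-m) d) - 1 = PySem.Int.floordiv (m - 1) d := by
  set q := PySem.Int.floordiv (m - 1) d with hq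
  have h1 : q * d ≤ m - 1 ∧ m - 1 < (q + 1) * d :=
    (PySem.Int.floordiv_eq_iff_of_pos hd).mp hq.symm
  have h2 : -(PySem.Int.floordiv (-m) d) = q + 1 :=
    (PySem.Int.neg_floordiv_neg_eq_iff_of_pos hd).mpr (by constructor <;> nlinarith [h1.1, h1.2])
  omega

-- (m-1)//d halves when d doubles (via Nat division)
lemma pvFloordiv_double (m d : Int) (hd : 0 < d) (hm : 0 < m) :
    PySem.Int.floordiv (PySem.Int.floordiv (m - 1) d) 2 = PySem.Int.floordiv (m - 1) (2 * d) := by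
  obtain ⟨M, hM⟩ : ∃ M : Nat, m - 1 = (M : Int) := ⟨(m - 1).toNat, by omega⟩
  obtain ⟨D, hD⟩ : ∃ D : Nat, d = (D : Int) := ⟨d.toNat, by omega⟩
  rw [hM, hD]
  rw [PySem.Int.floordiv_natCast M D]
  rw [show ((2 : Int) * (D : Int)) = ((2 * D : Nat) : Int) by push_cast; ring]
  rw [show ((2 : Int)) = ((2 : Nat) : Int) by norm_num]
  rw [PySem.Int.floordiv_natCast (M / D) 2, PySem.Int.floordiv_natCast M (2 * D)]
  rw [Nat.div_div_eq_div_mul, Nat.mul_comm D 2]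

-- closed form for what the loop adds to steps
lemma pvLoopA_eq (A m s : Int) (hA : 2 ≤ A) :
    pvLoopA m A s =
      s + (if m < A then 0
           else ((PySem.Int.bitLength ((-(PySem.Int.floordiv (-m) (A - 1))) - 1) : Nat) : Int)) := by
  rw [pvLoopA]
  by_cases h : A ≤ m
  · rw [dif_pos h, dif_pos hA]
    rw [pvLoopA_eq (A + (A - 1)) m (s + 1) (by omega)]
    rw [if_neg (show ¬ m < A by omega)]
    have hd : (0 : Int) < A - 1 := by omega
    have hm : (0 : Int) < m := by omega
    have hkey : -(PySem.Int.floordiv (-m) (A - 1)) - 1 = PySem.Int.floordiv (m - 1) (A - 1) :=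
      pvCeil_sub_one m (A - 1) hd hm
    set n := PySem.Int.floordiv (m - 1) (A - 1) with hn
    have hn1 : 1 ≤ n := by
      have := (PySem.Int.floordiv_eq_iff_of_pos hd (q := n)).mp hn.symm
      nlinarith [this.1, this.2]
    by_cases h2 : m < A + (A - 1)
    · -- the next iteration is the last: n = 1, bitLength 1 = 1
      rw [if_pos h2, hkey]
      have hne : n = 1 := by
        have := (PySem.Int.floordiv_eq_iff_of_pos hd (q := n)).mp hn.symm
        nlinarith [this.1, this.2]
      rw [hne]
      have hb1 : PySem.Int.bitLength 1 = 1 := by decide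
      omega
    · rw [if_neg h2, hkey]
      have hkey2 : -(PySem.Int.floordiv (-m) (A + (A - 1) - 1)) - 1
          = PySem.Int.floordiv (m - 1) (2 * (A - 1)) := by
        rw [show A + (A - 1) - 1 = 2 * (A - 1) by ring]
        exact pvCeil_sub_one m (2 * (A - 1)) (by omega) hm
      rw [hkey2, ← pvFloordiv_double m (A - 1) hd hm, ← hn]
      have := PySem.Int.bitLength_of_pos (n := n) (by omega)
      omega
  · rw [dif_neg h, if_pos (by omega)]; omega
termination_by (m + 1 - A).toNat
decreasing_by omega

-- ===== VERDICT (by name: the statement is the Claim_ definition above) =====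
theorem stepsNeededForNext_spec : Claim_equal_stepsNeededForNext := by
  intro A motes _hdom hpre
  obtain ⟨hne, hpre2⟩ := hpre
  unfold Spec_stepsNeededForNext stepsNeededForNext stepsNeededForNext_alt
  obtain ⟨h0, t⟩ := List.exists_cons_of_ne_nil hne
  obtain ⟨tl, rfl⟩ := t
  rw [PySem.List.min?_id_cons]
  dsimp only
  set m := tl.foldl min h0 with hm
  have hmin : ∀ y ∈ h0 :: tl, m ≤ y := by
    intro y hy
    rcases List.mem_cons.mp hy with rfl | hy'
    · exact (PySem.List.foldl_min_le tl y).1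
    · exact (PySem.List.foldl_min_le tl h0).2 y hy'
  by_cases hg : 1 ≤ m ∧ A = 1
  · rw [if_pos hg, if_neg (by omega), if_pos hg.2]
  · rw [if_neg hg]
    by_cases hlt : m < A
    · rw [if_pos hlt]
      rw [pvLoopA]
      rw [dif_neg (by omega)]
    · -- A ≤ m; Pre_ and ¬(1 ≤ m ∧ A = 1) force 2 ≤ A
      have hA2 : 2 ≤ A := by
        rcases hpre2 with h1 | ⟨x, hx, hxA⟩
        · omega
        · exact absurd (lt_of_le_of_lt (hmin x hx) hxA) hlt
      rw [if_neg hlt, if_neg (by omega)]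
      rw [pvLoopA_eq A m 0 hA2, if_neg hlt]
      omega
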